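-- pv_equiv track=rewrite | github.com/BlackFoundryCom/robo-cjk | sources/utils/files.py | handleClash1
-- ===== SOURCE A (Python) =====
-- maxFileNameLength = 255
--
-- def handleClash1(userName, existing=[], prefix="", suffix=""):
--     """
--     existing should be a case-insensitive list
--     of all existing file names.
--
--     >>> prefix = ("0" * 5) + "."
--     >>> suffix = "." + ("0" * 10)
--     >>> existing = ["a" * 5]
--
--     >>> e = list(existing)
--     >>> handleClash1(userName="A" * 5, existing=e,
--     ...     prefix=prefix, suffix=suffix)
--     '00000.AAAAA000000000000001.0000000000'
--
--     >>> e = list(existing)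
--     >>> e.append(prefix + "aaaaa" + "1".zfill(15) + suffix)
--     >>> handleClash1(userName="A" * 5, existing=e,
--     ...     prefix=prefix, suffix=suffix)
--     '00000.AAAAA000000000000002.0000000000'
--
--     >>> e = list(existing)
--     >>> e.append(prefix + "AAAAA" + "2".zfill(15) + suffix)
--     >>> handleClash1(userName="A" * 5, existing=e,
--     ...     prefix=prefix, suffix=suffix)
--     '00000.AAAAA000000000000001.0000000000'
--     """
--     # if the prefix length + user name length + suffix length + 15 is at
--     # or past the maximum length, silce 15 characters off of the user name
--     prefixLength = len(prefix)
--     suffixLength = len(suffix)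
--     if prefixLength + len(userName) + suffixLength + 15 > maxFileNameLength:
--         l = (prefixLength + len(userName) + suffixLength + 15)
--         sliceLength = maxFileNameLength - l
--         userName = userName[:sliceLength]
--     finalName = None
--     # try to add numbers to create a unique name
--     counter = 1
--     while finalName is None:
--         name = userName + str(counter).zfill(15)
--         fullName = prefix + name + suffix
--         if fullName.lower() not in existing:
--             finalName = fullName
--             break
--         else:
--             counter += 1
--         if counter >= 999999999999999:
--             break
--     # if there is a clash, go to the next fallback
--     if finalName is None:
--         finalName = handleClash2(existing, prefix, suffix)
--     # finished
--     return finalName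
--
-- def handleClash2(existing=[], prefix="", suffix=""):
--     """
--     existing should be a case-insensitive list
--     of all existing file names.
--
--     >>> prefix = ("0" * 5) + "."
--     >>> suffix = "." + ("0" * 10)
--     >>> existing = [prefix + str(i) + suffix for i in range(100)]
--
--     >>> e = list(existing)
--     >>> handleClash2(existing=e, prefix=prefix, suffix=suffix)
--     '00000.100.0000000000'
--
--     >>> e = list(existing)
--     >>> e.remove(prefix + "1" + suffix)
--     >>> handleClash2(existing=e, prefix=prefix, suffix=suffix)
--     '00000.1.0000000000'
--
--     >>> e = list(existing)
--     >>> e.remove(prefix + "2" + suffix)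
--     >>> handleClash2(existing=e, prefix=prefix, suffix=suffix)
--     '00000.2.0000000000'
--     """
--     # calculate the longest possible string
--     maxLength = maxFileNameLength - len(prefix) - len(suffix)
--     maxValue = int("9" * maxLength)
--     # try to find a number
--     finalName = None
--     counter = 1
--     while finalName is None:
--         fullName = prefix + str(counter) + suffix
--         if fullName.lower() not in existing:
--             finalName = fullName
--             break
--         else:
--             counter += 1
--         if counter >= maxValue:
--             break
--     # raise an error if nothing has been found
--     if finalName is None:
--         raise NameTranslationError("No unique name could be found.")
--     # finished
--     return finalName
-- ===== SOURCE B (Python) =====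
-- # B: instead of probing candidate names one by one against the existing list,
-- # scan `existing` once, collect the numeric counters of entries that already have
-- # the candidate shape, and walk the sorted counters to find the smallest free one.
--
-- maxFileNameLength = 255
--
--
-- def handleClash2(existing=[], prefix="", suffix=""):
--     # fallback, unchanged from the module (only reachable when every counter
--     # below 999999999999999 is taken)
--     maxLength = maxFileNameLength - len(prefix) - len(suffix)
--     maxValue = int("9" * maxLength)
--     finalName = None
--     counter = 1
--     while finalName is None:
--         fullName = prefix + str(counter) + suffix
--         if fullName.lower() not in existing:
--             finalName = fullName
--             break
--         else:
--             counter += 1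
--         if counter >= maxValue:
--             break
--     if finalName is None:
--         raise NameTranslationError("No unique name could be found.")
--     return finalName
--
--
-- def handleClash1(userName, existing=[], prefix="", suffix=""):
--     if len(prefix) + len(userName) + len(suffix) + 15 > maxFileNameLength:
--         l = len(prefix) + len(userName) + len(suffix) + 15
--         userName = userName[:maxFileNameLength - l]
--     head = (prefix + userName).lower()
--     tail = suffix.lower()
--     # collect the counters already taken by entries of the candidate shape
--     used = set()
--     for entry in existing:
--         if (len(entry) == len(head) + 15 + len(tail)
--                 and entry.startswith(head) and entry.endswith(tail)):
--             mid = entry[len(head):len(head) + 15]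
--             if mid.isdigit():
--                 v = 0
--                 for ch in mid:
--                     v = v * 10 + (ord(ch) - 48)
--                 used.add(v)
--     # smallest counter >= 1 not taken
--     c = 1
--     for u in sorted(used):
--         if u == c:
--             c += 1
--         elif u > c:
--             break
--     if c < 999999999999999:
--         return prefix + userName + str(c).zfill(15) + suffix
--     return handleClash2(existing, prefix, suffix)
-- ===== Notes on version B (the rewrite author's own statement) =====
-- stated objective: alternative
-- what changed: Instead of probing candidate names counter by counter against the existing list, B scans `existing` once, extracts the numeric counters of entries that already have the candidate shape (prefix+userName lowered, 15 digits, suffix lowered), and walks them in sorted order to find the smallest free counter.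
import Mathlib
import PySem

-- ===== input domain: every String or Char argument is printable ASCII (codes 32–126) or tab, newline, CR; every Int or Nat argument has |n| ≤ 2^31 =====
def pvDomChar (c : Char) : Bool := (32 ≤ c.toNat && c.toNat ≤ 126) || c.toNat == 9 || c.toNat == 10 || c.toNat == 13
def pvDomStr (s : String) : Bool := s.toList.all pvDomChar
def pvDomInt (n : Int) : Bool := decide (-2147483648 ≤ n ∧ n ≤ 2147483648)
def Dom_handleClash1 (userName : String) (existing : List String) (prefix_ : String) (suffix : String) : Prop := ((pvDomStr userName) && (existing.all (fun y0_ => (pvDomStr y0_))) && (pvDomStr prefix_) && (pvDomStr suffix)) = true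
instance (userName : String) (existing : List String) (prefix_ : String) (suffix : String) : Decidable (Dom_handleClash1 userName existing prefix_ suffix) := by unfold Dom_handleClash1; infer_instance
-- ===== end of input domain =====

-- B scans `existing` once for the counters already used by candidate-shaped entries and
-- walks them in sorted order, instead of probing candidate names one by one (alternative
-- algorithm, same return values; neither program mutates its arguments).

-- ===== PORT A =====
-- port of the module's handleClash2 (the fallback): Option, `none` marks the places the
-- Python raises (ValueError from int("") when maxLength ≤ 0, NameTranslationError)
def pvClash2Loop (pre suf : List Char) (ex : List (List Char)) (maxValue : Int) :
    Nat → Int → Option (List Char)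
  | 0, _ => none
  | fuel+1, counter =>
    let fullName := pre ++ PySem.Int.toChars counter ++ suf
    if PySem.Chars.lower fullName ∈ ex then
      if counter + 1 ≥ maxValue then none
      else pvClash2Loop pre suf ex maxValue fuel (counter + 1)
    else some fullName

def pvHandleClash2 (existing : List String) (prefix_ suffix : String) : Option String :=
  let pre := prefix_.toList
  let suf := suffix.toList
  let maxLength : Int := 255 - (pre.length : Int) - (suf.length : Int)
  match PySem.Int.ofChars? (List.replicate maxLength.toNat '9') with
  | none => none
  | some maxValue =>
    match pvClash2Loop pre suf (existing.map String.toList) maxValue maxValue.toNat 1 with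
    | some r => some (String.ofList r)
    | none => none

-- A's `while finalName is None` probing loop, fuel-bounded (fuel ≥ number of iterations)
def pvClash1Loop (pre un suf : List Char) (ex : List (List Char)) :
    Nat → Int → Option (List Char)
  | 0, _ => none
  | fuel+1, counter =>
    let name := un ++ PySem.Chars.zfill (PySem.Int.toChars counter) 15
    let fullName := pre ++ name ++ suf
    if PySem.Chars.lower fullName ∈ ex then
      if counter + 1 ≥ 999999999999999 then none
      else pvClash1Loop pre un suf ex fuel (counter + 1)
    else some fullName

def handleClash1 (userName : String) (existing : List String) (prefix_ : String) (suffix : String) : String :=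
  let pre := prefix_.toList
  let suf := suffix.toList
  let prefixLength : Int := pre.length
  let suffixLength : Int := suf.length
  let un0 := userName.toList
  let un :=
    if prefixLength + (un0.length : Int) + suffixLength + 15 > 255 then
      let l : Int := prefixLength + (un0.length : Int) + suffixLength + 15
      PySem.List.slice un0 none (some (255 - l))
    else un0
  match pvClash1Loop pre un suf (existing.map String.toList) 999999999999999 1 with
  | some fullName => String.ofList fullName
  | none => (pvHandleClash2 existing prefix_ suffix).getD ""

-- ===== PORT B =====
-- B's hand-written horner loop `v = v*10 + (ord(ch) - 48)`
def pvStep (a : Int) (c : Char) : Int := a * 10 + ((c.toNat : Int) - 48)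
def pvVal (cs : List Char) : Int := cs.foldl pvStep 0

-- B's one scan over `existing`: collect the counters of entries of candidate shape
def pvUsed (head tail : List Char) (ex : List (List Char)) : PySem.Set Int :=
  ex.foldl (fun acc entry =>
    if (entry.length == head.length + 15 + tail.length)
        && PySem.Chars.startswith entry head && PySem.Chars.endswith entry tail then
      let mid := PySem.List.slice entry (some (head.length : Int)) (some ((head.length : Int) + 15))
      if PySem.Chars.strIsdigit mid then PySem.Set.add acc (pvVal mid) else acc
    else acc) PySem.Set.empty

-- B's `for u in sorted(used)` walk with its break
def pvWalk : Int → List Int → Int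
  | c, [] => c
  | c, u :: us => if u = c then pvWalk (c + 1) us else if u > c then c else pvWalk c us

def handleClash1_alt (userName : String) (existing : List String) (prefix_ : String) (suffix : String) : String :=
  let pre := prefix_.toList
  let suf := suffix.toList
  let un0 := userName.toList
  let un :=
    if (pre.length : Int) + (un0.length : Int) + (suf.length : Int) + 15 > 255 then
      PySem.List.slice un0 none
        (some (255 - ((pre.length : Int) + (un0.length : Int) + (suf.length : Int) + 15)))
    else un0
  let head := PySem.Chars.lower (pre ++ un)
  let tail := PySem.Chars.lower suf
  let used := pvUsed head tail (existing.map String.toList)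
  let c := pvWalk 1 (PySem.List.sorted used (fun x => x) false)
  if c < 999999999999999 then
    String.ofList (pre ++ un ++ PySem.Chars.zfill (PySem.Int.toChars c) 15 ++ suf)
  else (pvHandleClash2 existing prefix_ suffix).getD ""

-- ===== PRECONDITION & SPEC =====
-- Pre_ excludes only lists of ≥ 999999999999998 entries: only there can A run out of
-- counters and raise (NameTranslationError / ValueError inside the fallback); on every
-- shorter list A returns normally, so Pre_ admits essentially all of A's domain.
def Pre_handleClash1 (userName : String) (existing : List String) (prefix_ : String) (suffix : String) : Prop :=
  (existing.length : Int) < 999999999999998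

instance (userName : String) (existing : List String) (prefix_ : String) (suffix : String) : Decidable (Pre_handleClash1 userName existing prefix_ suffix) := by unfold Pre_handleClash1; infer_instance

def pvWitness_handleClash1 : String × List String × String × String :=
  ("Name", ["name000000000000001.ufo"], "", ".ufo")

def Spec_handleClash1 (userName : String) (existing : List String) (prefix_ : String) (suffix : String) (out : String) : Prop := out = handleClash1_alt userName existing prefix_ suffix
instance (userName : String) (existing : List String) (prefix_ : String) (suffix : String) (out : String) : Decidable (Spec_handleClash1 userName existing prefix_ suffix out) := by unfold Spec_handleClash1; infer_instance

-- ===== CLAIM (what is proved, stated in full; the proofs are below) =====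
def Claim_equal_handleClash1 : Prop := ∀ (userName : String) (existing : List String) (prefix_ : String) (suffix : String), Dom_handleClash1 userName existing prefix_ suffix → Pre_handleClash1 userName existing prefix_ suffix → Spec_handleClash1 userName existing prefix_ suffix (handleClash1 userName existing prefix_ suffix)

-- ===== LEMMAS AND PROOFS =====

-- ---- decimal printing: Nat.toDigits 10 via a bare recursion ----
def pvRep (n : Nat) : List Char :=
  if n < 10 then [Nat.digitChar n]
  else pvRep (n / 10) ++ [Nat.digitChar (n % 10)]
  decreasing_by exact Nat.div_lt_self (by omega) (by omega)

theorem pvToDigitsCore_eq (f : Nat) : ∀ (n : Nat) (acc : List Char), n < f →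
    Nat.toDigitsCore 10 f n acc = pvRep n ++ acc := by
  induction f with
  | zero => omega
  | succ f ih =>
    intro n acc h
    rw [Nat.toDigitsCore]
    by_cases h10 : n / 10 = 0
    · have hn : n < 10 := by omega
      rw [if_pos h10, pvRep, if_pos hn, Nat.mod_eq_of_lt hn]
      simp
    · rw [if_neg h10, ih (n / 10) _ (by omega)]
      rw [pvRep.eq_def (n := n), if_neg (by omega)]
      simp

theorem pvToChars_eq (c : Int) (h : 0 ≤ c) : PySem.Int.toChars c = pvRep c.toNat := by
  rw [PySem.Int.toChars, if_neg (by omega), Nat.toDigits, pvToDigitsCore_eq _ _ _ (by omega)]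
  simp

theorem pvDigitChar_isdigit (d : Nat) (h : d < 10) : PySem.Chars.isdigit (Nat.digitChar d) = true := by
  interval_cases d <;> decide

theorem pvDigitChar_toNat (d : Nat) (h : d < 10) : (Nat.digitChar d).toNat = 48 + d := by
  interval_cases d <;> decide

theorem pvRep_all_digit (n : Nat) : ∀ c ∈ pvRep n, PySem.Chars.isdigit c = true := by
  induction n using pvRep.induct with
  | case1 n h =>
    rw [pvRep, if_pos h]
    intro c hc
    simp at hc
    subst hc; exact pvDigitChar_isdigit n h
  | case2 n h ih =>
    rw [pvRep, if_neg h]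
    intro c hc
    rcases List.mem_append.mp hc with h1 | h1
    · exact ih c h1
    · simp at h1; subst h1; exact pvDigitChar_isdigit _ (by omega)

theorem pvRep_foldl (n : Nat) : ∀ a : Int,
    (pvRep n).foldl pvStep a = a * 10 ^ (pvRep n).length + n := by
  induction n using pvRep.induct with
  | case1 n h =>
    intro a
    rw [pvRep, if_pos h]
    simp [pvStep, pvDigitChar_toNat n h]
  | case2 n h ih =>
    intro a
    rw [pvRep, if_neg h]
    rw [List.foldl_append, ih]
    simp [pvStep, pvDigitChar_toNat (n % 10) (by omega)]
    rw [pow_succ]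
    have : ((n : Int) / 10) * 10 + (n % 10) = n := by omega
    ring_nf
    omega

theorem pvRep_length_le (n : Nat) : ∀ e : Nat, 0 < e → n < 10 ^ e → (pvRep n).length ≤ e := by
  induction n using pvRep.induct with
  | case1 n h =>
    intro e he _
    rw [pvRep, if_pos h]; simpa using he
  | case2 n h ih =>
    intro e he hlt
    rw [pvRep, if_neg h]
    have he2 : 2 ≤ e := by
      by_contra hc
      interval_cases e <;> omega
    have hdiv : n / 10 < 10 ^ (e - 1) := by
      have : 10 ^ e = 10 ^ (e - 1) * 10 := by
        rw [← pow_succ]; congr 1; omega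
      omega
    have := ih (e - 1) (by omega) hdiv
    simp; omega

theorem pvRep_ne_nil (n : Nat) : pvRep n ≠ [] := by
  rw [pvRep]; split <;> simp

-- ---- digit characters and horner values ----
theorem pvIsdigit_iff (c : Char) : PySem.Chars.isdigit c = true ↔ 48 ≤ c.toNat ∧ c.toNat ≤ 57 := by
  unfold PySem.Chars.isdigit
  rw [Bool.and_eq_true, decide_eq_true_eq, decide_eq_true_eq, Char.le_def, Char.le_def,
    UInt32.le_iff_toNat_le, UInt32.le_iff_toNat_le]
  have h0 : ('0' : Char).val.toNat = 48 := rfl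
  have h9 : ('9' : Char).val.toNat = 57 := rfl
  rw [h0, h9]
  rfl

theorem pvChar_eq_of_toNat (c d : Char) (h : c.toNat = d.toNat) : c = d := by
  exact Char.ext (by exact UInt32.toNat_inj.mp h)

theorem pvVal_bounds (cs : List Char) (h : ∀ c ∈ cs, PySem.Chars.isdigit c = true) :
    0 ≤ pvVal cs ∧ pvVal cs < 10 ^ cs.length := by
  induction cs using List.reverseRecOn with
  | nil => simp [pvVal]
  | append_singleton xs c ih =>
    have hx := ih (fun d hd => h d (by simp [hd]))
    have hc := (pvIsdigit_iff c).mp (h c (by simp))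
    unfold pvVal at *
    rw [List.foldl_append] at *
    simp [pvStep]
    rw [pow_succ]
    constructor
    · nlinarith [hx.1]
    · nlinarith [hx.2]

theorem pvVal_inj (cs : List Char) : ∀ ds : List Char,
    (∀ c ∈ cs, PySem.Chars.isdigit c = true) → (∀ c ∈ ds, PySem.Chars.isdigit c = true) →
    cs.length = ds.length → pvVal cs = pvVal ds → cs = ds := by
  induction cs using List.reverseRecOn with
  | nil =>
    intro ds _ _ hl _
    symm; simpa using (List.length_eq_zero_iff.mp (by simpa using hl.symm))
  | append_singleton xs c ih =>
    intro ds hc hd hl hv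
    induction ds using List.reverseRecOn with
    | nil => simp at hl
    | append_singleton ys d _ =>
      have hcd := (pvIsdigit_iff c).mp (hc c (by simp))
      have hdd := (pvIsdigit_iff d).mp (hd d (by simp))
      unfold pvVal at hv
      rw [List.foldl_append, List.foldl_append] at hv
      simp [pvStep] at hv
      have h1 : pvVal xs * 10 + ((c.toNat : Int) - 48) = pvVal ys * 10 + ((d.toNat : Int) - 48) := hv
      have hcn : (c.toNat : Int) = d.toNat ∧ pvVal xs = pvVal ys := by omega
      have hce : c = d := pvChar_eq_of_toNat c d (by exact_mod_cast hcn.1)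
      have hxy : xs = ys := ih ys (fun x hx => hc x (by simp [hx])) (fun x hx => hd x (by simp [hx]))
        (by simpa using hl) hcn.2
      rw [hce, hxy]

-- ---- the candidate middle: str(c).zfill(15) ----
def pvMid (c : Int) : List Char := PySem.Chars.zfill (PySem.Int.toChars c) 15

theorem pvZfill_digits (cs : List Char) (hne : cs ≠ [])
    (hd : ∀ c ∈ cs, PySem.Chars.isdigit c = true) (hl : cs.length ≤ 15) :
    PySem.Chars.zfill cs 15 = List.replicate (15 - cs.length) '0' ++ cs := by
  unfold PySem.Chars.zfill
  by_cases h15 : (15 : Int) ≤ (cs.length : Int)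
  · rw [if_pos h15]
    have : cs.length = 15 := by omega
    simp [this]
  · rw [if_neg h15]
    cases cs with
    | nil => simp at hne
    | cons c rest =>
      have hc := (pvIsdigit_iff c).mp (hd c (by simp))
      have hpm : ¬(c = '+' ∨ c = '-') := by
        rintro (h | h) <;> subst h <;> simp [Char.toNat] at hc
      simp [hpm]

theorem pvFoldl_replicate_zero (k : Nat) : ∀ a : Int,
    (List.replicate k '0').foldl pvStep a = a * 10 ^ k := by
  induction k with
  | zero => intro a; simp
  | succ k ih =>
    intro a
    rw [List.replicate_succ, List.foldl_cons, ih]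
    have : pvStep a '0' = a * 10 := by simp [pvStep, Char.toNat]
    rw [this, pow_succ]
    ring

theorem pvMid_spec (c : Int) (h0 : 0 ≤ c) (h1 : c < 10 ^ 15) :
    (pvMid c).length = 15 ∧ (∀ x ∈ pvMid c, PySem.Chars.isdigit x = true) ∧ pvVal (pvMid c) = c := by
  have hn : c.toNat < 10 ^ 15 := by omega
  have hd := pvRep_all_digit c.toNat
  have hlen := pvRep_length_le c.toNat 15 (by omega) hn
  have hz : pvMid c = List.replicate (15 - (pvRep c.toNat).length) '0' ++ pvRep c.toNat := by
    rw [pvMid, pvToChars_eq c h0]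
    exact pvZfill_digits _ (pvRep_ne_nil _) hd hlen
  refine ⟨?_, ?_, ?_⟩
  · rw [hz]; simp; omega
  · rw [hz]
    intro x hx
    rcases List.mem_append.mp hx with h | h
    · rw [List.eq_of_mem_replicate h]; decide
    · exact hd x h
  · rw [hz]
    unfold pvVal
    rw [List.foldl_append, pvFoldl_replicate_zero, pvRep_foldl]
    simp
    omega

theorem pvMid_eq_of_val (ms : List Char) (hlen : ms.length = 15)
    (hd : ∀ c ∈ ms, PySem.Chars.isdigit c = true) : ms = pvMid (pvVal ms) := by
  have hb := pvVal_bounds ms hd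
  rw [hlen] at hb
  obtain ⟨hm1, hm2, hm3⟩ := pvMid_spec (pvVal ms) hb.1 hb.2
  exact pvVal_inj ms (pvMid (pvVal ms)) hd hm2 (by omega) hm3.symm

-- ---- lowercase facts ----
theorem pvLower_append (xs ys : List Char) :
    PySem.Chars.lower (xs ++ ys) = PySem.Chars.lower xs ++ PySem.Chars.lower ys := by
  simp [PySem.Chars.lower]

theorem pvLowerChar_digit (c : Char) (h : PySem.Chars.isdigit c = true) :
    PySem.Chars.lowerChar c = c := by
  have hc := (pvIsdigit_iff c).mp h
  unfold PySem.Chars.lowerChar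
  rw [if_neg]
  intro hu
  unfold PySem.Chars.isupper at hu
  rw [Bool.and_eq_true, decide_eq_true_eq, decide_eq_true_eq, Char.le_def, Char.le_def,
    UInt32.le_iff_toNat_le, UInt32.le_iff_toNat_le] at hu
  have h65 : ('A' : Char).val.toNat = 65 := rfl
  have h90 : ('Z' : Char).val.toNat = 90 := rfl
  rw [h65, h90] at hu
  have : c.toNat = c.val.toNat := rfl
  omega

theorem pvLower_digits (cs : List Char) (hd : ∀ c ∈ cs, PySem.Chars.isdigit c = true) :
    PySem.Chars.lower cs = cs := by
  unfold PySem.Chars.lower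
  rw [List.map_congr_left (fun c hc => pvLowerChar_digit c (hd c hc))]
  simp

-- ---- the shape test of B's scan ----
theorem pvShape_iff (head tail entry : List Char) :
    ((entry.length == head.length + 15 + tail.length)
      && PySem.Chars.startswith entry head && PySem.Chars.endswith entry tail) = true
    ↔ ∃ ms, entry = head ++ ms ++ tail ∧ ms.length = 15 := by
  rw [Bool.and_eq_true, Bool.and_eq_true, beq_iff_eq,
    PySem.Chars.startswith_iff, PySem.Chars.endswith_iff]
  constructor
  · rintro ⟨⟨hlen, hpre⟩, hsuf⟩
    obtain ⟨t, rfl⟩ := hpre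
    obtain ⟨s, hs⟩ := hsuf
    have hlt : t.length = 15 + tail.length := by simp at hlen; omega
    have hsl : s.length = head.length + 15 := by
      have := congrArg List.length hs
      simp at this; omega
    have hdrop : t.drop 15 = tail := by
      have h1 : (head ++ t).drop (head.length + 15) = t.drop 15 := by
        rw [List.drop_append]; simp
      have h2 : (s ++ tail).drop (head.length + 15) = tail := by
        rw [← hsl, List.drop_left]
      rw [← hs] at h1
      rw [h2] at h1
      exact h1.symm
    refine ⟨t.take 15, ?_, by simp; omega⟩
    conv_lhs => rw [← List.take_append_drop 15 t]
    rw [hdrop]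
    simp
  · rintro ⟨ms, rfl, hms⟩
    refine ⟨⟨by simp [hms]; ring, ?_⟩, ?_⟩
    · exact ⟨ms ++ tail, by simp⟩
    · exact ⟨head ++ ms, by simp⟩

theorem pvSlice_mid (head ms tail : List Char) (hlen : ms.length = 15) :
    PySem.List.slice (head ++ ms ++ tail) (some (head.length : Int))
      (some ((head.length : Int) + 15)) = ms := by
  have h15 : ((head.length : Int) + 15) = ((head.length + 15 : Nat) : Int) := by push_cast; ring
  rw [h15, PySem.List.slice_natCast]
  have : head.length + 15 - head.length = 15 := by omega
  rw [this]
  rw [List.append_assoc, List.drop_left]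
  rw [List.take_append_of_le_length (by omega)]
  rw [List.take_of_length_le (by omega)]

theorem pvDecomp_unique {head tail ms ms' : List Char}
    (h : head ++ ms ++ tail = head ++ ms' ++ tail) : ms = ms' := by
  rw [List.append_assoc, List.append_assoc] at h
  exact List.append_cancel_right (List.append_cancel_left h)

-- ---- what one entry contributes to B's `used` set ----
def pvEntryVal? (head tail entry : List Char) : Option Int :=
  if (entry.length == head.length + 15 + tail.length)
      && PySem.Chars.startswith entry head && PySem.Chars.endswith entry tail then
    let mid := PySem.List.slice entry (some (head.length : Int)) (some ((head.length : Int) + 15))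
    if PySem.Chars.strIsdigit mid then some (pvVal mid) else none
  else none

theorem pvEntryVal?_eq_some (head tail entry : List Char) (v : Int) :
    pvEntryVal? head tail entry = some v ↔
      ∃ ms, entry = head ++ ms ++ tail ∧ ms.length = 15 ∧
        (∀ c ∈ ms, PySem.Chars.isdigit c = true) ∧ pvVal ms = v := by
  unfold pvEntryVal?
  by_cases hshape : ((entry.length == head.length + 15 + tail.length)
      && PySem.Chars.startswith entry head && PySem.Chars.endswith entry tail) = true
  · rw [if_pos hshape]
    obtain ⟨ms, rfl, hms⟩ := (pvShape_iff head tail entry).mp hshape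
    rw [pvSlice_mid head ms tail hms]
    by_cases hdig : PySem.Chars.strIsdigit ms = true
    · rw [if_pos hdig]
      simp only [Option.some.injEq]
      constructor
      · rintro rfl
        refine ⟨ms, rfl, hms, ?_, rfl⟩
        intro c hc
        have h := hdig
        unfold PySem.Chars.strIsdigit at h
        rw [Bool.and_eq_true, List.all_eq_true] at h
        exact h.2 c hc
      · rintro ⟨ms', heq, _, _, rfl⟩
        rw [pvDecomp_unique heq.symm]
    · rw [if_neg hdig]
      constructor
      · intro h; cases h
      · rintro ⟨ms', heq, hms', hdg, rfl⟩
        exfalso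
        apply hdig
        have hmm : ms = ms' := pvDecomp_unique heq
        unfold PySem.Chars.strIsdigit
        rw [Bool.and_eq_true, List.all_eq_true]
        subst hmm
        refine ⟨by simp; intro h; rw [h] at hms; simp at hms, hdg⟩
  · rw [if_neg hshape]
    constructor
    · intro h; cases h
    · rintro ⟨ms, rfl, hms, _, _⟩
      exact absurd ((pvShape_iff head tail _).mpr ⟨ms, rfl, hms⟩) hshape

-- ---- membership / nodup / size of B's `used` set ----
theorem pvUsed_step_eq (head tail : List Char) (acc : PySem.Set Int) (entry : List Char) :
    (if (entry.length == head.length + 15 + tail.length)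
        && PySem.Chars.startswith entry head && PySem.Chars.endswith entry tail then
      let mid := PySem.List.slice entry (some (head.length : Int)) (some ((head.length : Int) + 15))
      if PySem.Chars.strIsdigit mid then PySem.Set.add acc (pvVal mid) else acc
    else acc)
    = match pvEntryVal? head tail entry with
      | some v => PySem.Set.add acc v
      | none => acc := by
  unfold pvEntryVal?
  dsimp only
  split_ifs <;> rfl

theorem pvUsed_mem (head tail : List Char) (ex : List (List Char)) (v : Int) :
    v ∈ pvUsed head tail ex ↔ ∃ e ∈ ex, pvEntryVal? head tail e = some v := by
  unfold pvUsed
  suffices h : ∀ acc : PySem.Set Int,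
      v ∈ ex.foldl (fun acc entry =>
        if (entry.length == head.length + 15 + tail.length)
            && PySem.Chars.startswith entry head && PySem.Chars.endswith entry tail then
          let mid := PySem.List.slice entry (some (head.length : Int)) (some ((head.length : Int) + 15))
          if PySem.Chars.strIsdigit mid then PySem.Set.add acc (pvVal mid) else acc
        else acc) acc
      ↔ v ∈ acc ∨ ∃ e ∈ ex, pvEntryVal? head tail e = some v by
    rw [h PySem.Set.empty]
    simp [PySem.Set.empty]
  induction ex with
  | nil => simp
  | cons e rest ih =>
    intro acc
    rw [List.foldl_cons, pvUsed_step_eq, ih]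
    cases hv : pvEntryVal? head tail e with
    | none =>
      simp only [List.mem_cons]
      constructor
      · rintro (h | ⟨e', he', hv'⟩)
        · exact Or.inl h
        · exact Or.inr ⟨e', Or.inr he', hv'⟩
      · rintro (h | ⟨e', (rfl | he'), hv'⟩)
        · exact Or.inl h
        · rw [hv] at hv'; cases hv'
        · exact Or.inr ⟨e', he', hv'⟩
    | some w =>
      rw [PySem.Set.mem_add]
      simp only [List.mem_cons]
      constructor
      · rintro ((h | rfl) | ⟨e', he', hv'⟩)
        · exact Or.inl h
        · exact Or.inr ⟨e, Or.inl rfl, hv⟩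
        · exact Or.inr ⟨e', Or.inr he', hv'⟩
      · rintro (h | ⟨e', (rfl | he'), hv'⟩)
        · exact Or.inl (Or.inl h)
        · rw [hv] at hv'
          exact Or.inl (Or.inr (Option.some.inj hv').symm)
        · exact Or.inr ⟨e', he', hv'⟩

theorem pvUsed_nodup (head tail : List Char) (ex : List (List Char)) :
    (pvUsed head tail ex).Nodup := by
  unfold pvUsed
  suffices h : ∀ acc : PySem.Set Int, acc.Nodup →
      (ex.foldl (fun acc entry =>
        if (entry.length == head.length + 15 + tail.length)
            && PySem.Chars.startswith entry head && PySem.Chars.endswith entry tail then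
          let mid := PySem.List.slice entry (some (head.length : Int)) (some ((head.length : Int) + 15))
          if PySem.Chars.strIsdigit mid then PySem.Set.add acc (pvVal mid) else acc
        else acc) acc).Nodup by
    exact h PySem.Set.empty (by simp [PySem.Set.empty])
  induction ex with
  | nil => intro acc h; simpa using h
  | cons e rest ih =>
    intro acc hacc
    rw [List.foldl_cons, pvUsed_step_eq]
    cases pvEntryVal? head tail e with
    | none => exact ih acc hacc
    | some w => exact ih _ (PySem.Set.nodup_add acc w hacc)

theorem pvUsed_length_le (head tail : List Char) (ex : List (List Char)) :
    (pvUsed head tail ex).length ≤ ex.length := by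
  unfold pvUsed
  suffices h : ∀ acc : PySem.Set Int,
      (ex.foldl (fun acc entry =>
        if (entry.length == head.length + 15 + tail.length)
            && PySem.Chars.startswith entry head && PySem.Chars.endswith entry tail then
          let mid := PySem.List.slice entry (some (head.length : Int)) (some ((head.length : Int) + 15))
          if PySem.Chars.strIsdigit mid then PySem.Set.add acc (pvVal mid) else acc
        else acc) acc).length ≤ acc.length + ex.length by
    simpa [PySem.Set.empty] using h PySem.Set.empty
  induction ex with
  | nil => intro acc; simp
  | cons e rest ih =>
    intro acc
    rw [List.foldl_cons, pvUsed_step_eq]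
    cases hv : pvEntryVal? head tail e with
    | none =>
      calc _ ≤ acc.length + rest.length := ih acc
        _ ≤ acc.length + (e :: rest).length := by simp
    | some w =>
      have hlen : (acc.add w).length ≤ acc.length + 1 := by
        by_cases hw : w ∈ acc
        · rw [PySem.Set.add_of_mem hw]; omega
        · rw [PySem.Set.add_of_not_mem hw]; simp
      calc _ ≤ (acc.add w).length + rest.length := ih _
        _ ≤ acc.length + (e :: rest).length := by simp; omega

-- ---- the sorted walk computes the least counter ≥ 1 outside the list ----
theorem pvWalk_spec (l : List Int) : ∀ c : Int, l.Pairwise (· < ·) →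
    c ≤ pvWalk c l ∧ pvWalk c l ∉ l ∧ ∀ m, c ≤ m → m < pvWalk c l → m ∈ l := by
  induction l with
  | nil =>
    intro c _
    simp only [pvWalk]
    refine ⟨le_refl c, by simp, ?_⟩
    intro m h1 h2; omega
  | cons u us ih =>
    intro c hp
    rw [List.pairwise_cons] at hp
    by_cases huc : u = c
    · subst huc
      obtain ⟨h1, h2, h3⟩ := ih (u + 1) hp.2
      rw [pvWalk, if_pos rfl]
      refine ⟨by omega, ?_, ?_⟩
      · intro hmem
        rcases List.mem_cons.mp hmem with h | h
        · omega
        · exact h2 h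
      · intro m hm1 hm2
        rcases eq_or_lt_of_le hm1 with rfl | h
        · exact List.mem_cons_self
        · exact List.mem_cons_of_mem _ (h3 m (by omega) hm2)
    · by_cases hgt : u > c
      · rw [pvWalk, if_neg huc, if_pos hgt]
        refine ⟨le_refl c, ?_, ?_⟩
        · intro hmem
          rcases List.mem_cons.mp hmem with h | h
          · omega
          · have := hp.1 _ h; omega
        · intro m h1 h2; omega
      · rw [pvWalk, if_neg huc, if_neg hgt]
        obtain ⟨h1, h2, h3⟩ := ih c hp.2
        refine ⟨h1, ?_, ?_⟩
        · intro hmem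
          rcases List.mem_cons.mp hmem with h | h
          · omega
          · exact h2 h
        · intro m hm1 hm2
          exact List.mem_cons_of_mem _ (h3 m hm1 hm2)

-- ---- A's loop returns the least free candidate ----
theorem pvClash1Loop_eq (pre un suf : List Char) (ex : List (List Char)) (m : Int)
    (hmL : m < 999999999999999) : ∀ (fuel : Nat) (c : Int), 1 ≤ c → c ≤ m →
    (m - c).toNat < fuel →
    (∀ x, c ≤ x → x < m → PySem.Chars.lower (pre ++ (un ++ pvMid x) ++ suf) ∈ ex) →
    PySem.Chars.lower (pre ++ (un ++ pvMid m) ++ suf) ∉ ex →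
    pvClash1Loop pre un suf ex fuel c = some (pre ++ (un ++ pvMid m) ++ suf) := by
  intro fuel
  induction fuel with
  | zero => intro c _ _ h; omega
  | succ fuel ih =>
    intro c h1 hcm hfuel htest hfree
    rw [pvClash1Loop]
    have hm : PySem.Chars.zfill (PySem.Int.toChars c) 15 = pvMid c := rfl
    simp only [hm]
    rcases eq_or_lt_of_le hcm with rfl | hlt
    · rw [if_neg hfree]
    · rw [if_pos (htest c (le_refl c) hlt), if_neg (by omega)]
      exact ih (c + 1) (by omega) (by omega) (by omega) (fun x hx1 hx2 => htest x (by omega) hx2) hfree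

-- ---- the central equivalence on char lists ----
theorem pvCentral (pre suf un : List Char) (ex : List (List Char))
    (hlen : (ex.length : Int) < 999999999999998) :
    pvWalk 1 (PySem.List.sorted
        (pvUsed (PySem.Chars.lower (pre ++ un)) (PySem.Chars.lower suf) ex) (fun x => x) false)
      < 999999999999999 ∧
    pvClash1Loop pre un suf ex 999999999999999 1 =
      some (pre ++ (un ++ pvMid (pvWalk 1 (PySem.List.sorted
        (pvUsed (PySem.Chars.lower (pre ++ un)) (PySem.Chars.lower suf) ex) (fun x => x) false)))
        ++ suf) := by
  set head := PySem.Chars.lower (pre ++ un) with hhead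
  set tail := PySem.Chars.lower suf with htail
  set used := pvUsed head tail ex with hused
  set l := PySem.List.sorted used (fun x => x) false with hl
  set c := pvWalk 1 l with hc
  have hperm : l.Perm used := PySem.List.sorted_perm used (fun x => x) false
  have hnodup : l.Nodup := hperm.symm.nodup (pvUsed_nodup head tail ex)
  have hpairle : l.Pairwise (fun a b => a ≤ b) := PySem.List.sorted_pairwise used (fun x => x)
  have hpairlt : l.Pairwise (· < ·) := by
    have := List.Pairwise.and hpairle hnodup
    exact this.imp (fun h => lt_of_le_of_ne h.1 h.2)
  obtain ⟨hc1, hcout, hcall⟩ := pvWalk_spec l 1 hpairlt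
  -- c is at most |used| + 1 ≤ |ex| + 1
  have hbound : c ≤ (used.length : Int) + 1 := by
    by_contra hcon
    rw [Int.not_le] at hcon
    have hsub : PySem.List.pyRange 1 c 1 ⊆ used := by
      intro x hx
      rw [PySem.List.mem_pyRange_one] at hx
      exact hperm.mem_iff.mp (hcall x hx.1 hx.2)
    have hnd : (PySem.List.pyRange 1 c 1).Nodup := PySem.List.nodup_pyRange_one 1 c
    have hle : (PySem.List.pyRange 1 c 1).length ≤ used.length := by
      have h1 : (PySem.List.pyRange 1 c 1).toFinset.card = (PySem.List.pyRange 1 c 1).length :=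
        List.toFinset_card_of_nodup hnd
      have h2 : (PySem.List.pyRange 1 c 1).toFinset ⊆ used.toFinset := by
        intro x hx
        rw [List.mem_toFinset] at hx ⊢
        exact hsub hx
      calc (PySem.List.pyRange 1 c 1).length = _ := h1.symm
        _ ≤ used.toFinset.card := Finset.card_le_card h2
        _ ≤ used.length := used.toFinset_card_le
    rw [PySem.List.length_pyRange_one] at hle
    omega
  have hexlen : (used.length : Int) ≤ ex.length := by
    exact_mod_cast pvUsed_length_le head tail ex
  have hc999 : c ≤ 999999999999998 := by omega
  have hc15 : c < 10 ^ 15 := by omega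
  -- the bridge: a counter is in `used` iff A's lowered candidate is in `existing`
  have hbridge : ∀ x : Int, 1 ≤ x → x < 10 ^ 15 →
      (x ∈ used ↔ PySem.Chars.lower (pre ++ (un ++ pvMid x) ++ suf) ∈ ex) := by
    intro x hx1 hx15
    obtain ⟨hm1, hm2, hm3⟩ := pvMid_spec x (by omega) hx15
    have hlow : PySem.Chars.lower (pre ++ (un ++ pvMid x) ++ suf)
        = head ++ pvMid x ++ tail := by
      simp only [pvLower_append, hhead, htail]
      rw [pvLower_digits (pvMid x) hm2]
      simp [List.append_assoc]
    rw [hlow, hused, pvUsed_mem]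
    constructor
    · rintro ⟨e, he, hev⟩
      obtain ⟨ms, rfl, hms, hmsd, hmsv⟩ := (pvEntryVal?_eq_some head tail e x).mp hev
      have : ms = pvMid x := by
        rw [pvMid_eq_of_val ms hms hmsd, hmsv]
      rw [← this]
      exact he
    · intro he
      exact ⟨head ++ pvMid x ++ tail, he,
        (pvEntryVal?_eq_some head tail _ x).mpr ⟨pvMid x, rfl, hm1, hm2, hm3⟩⟩
  refine ⟨by omega, ?_⟩
  apply pvClash1Loop_eq pre un suf ex c (by omega) 999999999999999 1 (le_refl 1) hc1 (by omega)
  · intro x hx1 hx2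
    exact (hbridge x hx1 (by omega)).mp (hperm.mem_iff.mp (hcall x hx1 hx2))
  · intro hmem
    exact hcout (hperm.mem_iff.mpr ((hbridge c hc1 hc15).mpr hmem))

-- ===== VERDICT (by name: the statement is the Claim_ definition above) =====
theorem handleClash1_spec : Claim_equal_handleClash1 := by
  unfold Claim_equal_handleClash1
  intro userName existing prefix_ suffix _ hpre
  unfold Pre_handleClash1 at hpre
  unfold Spec_handleClash1 handleClash1 handleClash1_alt
  dsimp only
  obtain ⟨hlt, hloop⟩ := pvCentral prefix_.toList suffix.toList
    (if (prefix_.toList.length : Int) + (userName.toList.length : Int)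
        + (suffix.toList.length : Int) + 15 > 255 then
      PySem.List.slice userName.toList none
        (some (255 - ((prefix_.toList.length : Int) + (userName.toList.length : Int)
          + (suffix.toList.length : Int) + 15)))
    else userName.toList)
    (existing.map String.toList) (by simpa using hpre)
  rw [hloop, if_pos hlt]
  simp [List.append_assoc, pvMid]
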